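-- pv_equiv track=rewrite | github.com/LeSurvivant9/fight-club | scripts/check_compose_order.py | check_service_order
-- ===== SOURCE A (Python) =====
-- from typing import Any
--
-- KEY_ORDER = [
--     "extends",
--     "image",
--     "build",
--     "container_name",
--     "hostname",
--     "environment",
--     "env_file",
--     "networks",
--     "network_mode",
--     "ports",
--     "expose",
--     "volumes",
--     "devices",
--     "configs",
--     "healthcheck",
--     "labels",
--     "restart",
--     "depends_on",
--     "mem_limit",
--     "memswap_limit",
--     "shm_size",
--     "cap_add",
--     "cap_drop",
--     "security_opt",
--     "privileged",
--     "sysctls",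
--     "extra_hosts",
--     "command",
--     "entrypoint",
--     "working_dir",
--     "user",
--     "group_add",
--     "ulimits",
--     "logging",
--     "deploy",
--     "profiles",
-- ]
--
-- def get_key_index(key: str) -> int:
--     """Get the expected index for a key. Unknown keys go at the end."""
--     try:
--         return KEY_ORDER.index(key)
--     except ValueError:
--         return len(KEY_ORDER)
--
-- def check_service_order(service_name: str, service_config: dict[str, Any]) -> list[str]:
--     """Check if keys in a service are in the correct order."""
--     errors: list[str] = []
--     if not isinstance(service_config, dict):
--         return errors
--
--     keys = list(service_config.keys())
--     expected_order = sorted(keys, key=get_key_index)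
--
--     for _i, (actual, expected) in enumerate(zip(keys, expected_order, strict=False)):
--         if actual != expected:
--             errors.append(
--                 f"Service '{service_name}': key '{actual}' should come after '{expected}'"
--             )
--
--     return errors
-- ===== SOURCE B (Python) =====
-- from typing import Any
--
-- KEY_ORDER = [
--     "extends", "image", "build", "container_name", "hostname", "environment",
--     "env_file", "networks", "network_mode", "ports", "expose", "volumes",
--     "devices", "configs", "healthcheck", "labels", "restart", "depends_on",
--     "mem_limit", "memswap_limit", "shm_size", "cap_add", "cap_drop",
--     "security_opt", "privileged", "sysctls", "extra_hosts", "command",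
--     "entrypoint", "working_dir", "user", "group_add", "ulimits", "logging",
--     "deploy", "profiles",
-- ]
--
-- def check_service_order(service_name: str, service_config: dict[str, Any]) -> list[str]:
--     """Check if keys in a service are in the correct order."""
--     if not isinstance(service_config, dict):
--         return []
--     keys = list(service_config.keys())
--     # canonical order rebuilt by scanning the fixed table: known keys in
--     # KEY_ORDER order, then unknown keys in their original order (no sort call)
--     expected_order = [k for known in KEY_ORDER for k in keys if k == known]
--     expected_order += [k for k in keys if k not in KEY_ORDER]
--     return [
--         f"Service '{service_name}': key '{actual}' should come after '{expected}'"
--         for actual, expected in zip(keys, expected_order)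
--         if actual != expected
--     ]
-- ===== Notes on version B (the rewrite author's own statement) =====
-- stated objective: simpler
-- what changed: The canonical key order is rebuilt by a single scan of the constant KEY_ORDER table (known keys in table order, then unknown keys in original order) instead of a comparison sort keyed by repeated KEY_ORDER.index lookups, and the error loop becomes one comprehension; get_key_index disappears.
import Mathlib
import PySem

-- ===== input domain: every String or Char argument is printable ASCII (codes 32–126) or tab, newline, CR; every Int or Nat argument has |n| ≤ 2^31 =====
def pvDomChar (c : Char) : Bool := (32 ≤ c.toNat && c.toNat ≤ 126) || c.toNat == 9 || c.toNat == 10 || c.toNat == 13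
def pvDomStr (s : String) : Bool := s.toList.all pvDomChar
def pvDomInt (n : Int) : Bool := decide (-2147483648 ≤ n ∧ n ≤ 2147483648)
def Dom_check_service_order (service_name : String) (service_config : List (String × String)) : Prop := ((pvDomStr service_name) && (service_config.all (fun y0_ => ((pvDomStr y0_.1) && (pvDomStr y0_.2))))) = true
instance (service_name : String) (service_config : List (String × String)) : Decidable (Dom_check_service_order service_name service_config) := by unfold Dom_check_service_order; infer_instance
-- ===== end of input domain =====

-- ===== PORT A =====
-- B replaces the key-index comparison sort by one scan of the constant KEY_ORDER table (simpler; same results).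

-- module constant KEY_ORDER (shared by both ports)
def pvKEY_ORDER : List String :=
  ["extends", "image", "build", "container_name", "hostname", "environment",
   "env_file", "networks", "network_mode", "ports", "expose", "volumes",
   "devices", "configs", "healthcheck", "labels", "restart", "depends_on",
   "mem_limit", "memswap_limit", "shm_size", "cap_add", "cap_drop",
   "security_opt", "privileged", "sysctls", "extra_hosts", "command",
   "entrypoint", "working_dir", "user", "group_add", "ulimits", "logging",
   "deploy", "profiles"]

-- helper get_key_index: KEY_ORDER.index(key), ValueError -> len(KEY_ORDER)
def get_key_index (key : String) : Int :=
  match PySem.List.index? pvKEY_ORDER key with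
  | some i => (i : Int)
  | none => (pvKEY_ORDER.length : Int)

-- port of A; the isinstance(service_config, dict) guard is always true under the type convention
def check_service_order (service_name : String) (service_config : List (String × String)) : List String :=
  let keys := service_config.map Prod.fst
  let expected_order := PySem.List.sorted keys (fun k => get_key_index k) false
  (keys.zip expected_order).foldl
    (fun errors pr =>
      if pr.1 != pr.2 then
        errors ++ ["Service '" ++ service_name ++ "': key '" ++ pr.1 ++ "' should come after '" ++ pr.2 ++ "'"]
      else errors) []

-- ===== PORT B =====
def check_service_order_alt (service_name : String) (service_config : List (String × String)) : List String :=
  let keys := service_config.map Prod.fst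
  let expected_order :=
    pvKEY_ORDER.flatMap (fun known => keys.filter (fun k => k == known))
      ++ keys.filter (fun k => !(pvKEY_ORDER.contains k))
  ((keys.zip expected_order).filter (fun pr => pr.1 != pr.2)).map
    (fun pr => "Service '" ++ service_name ++ "': key '" ++ pr.1 ++ "' should come after '" ++ pr.2 ++ "'")

-- ===== PRECONDITION & SPEC =====
def Spec_check_service_order (service_name : String) (service_config : List (String × String)) (out : List String) : Prop := out = check_service_order_alt service_name service_config
instance (service_name : String) (service_config : List (String × String)) (out : List String) : Decidable (Spec_check_service_order service_name service_config out) := by unfold Spec_check_service_order; infer_instance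

-- ===== CLAIM (what is proved, stated in full; the proofs are below) =====
def Claim_equal_check_service_order : Prop := ∀ (service_name : String) (service_config : List (String × String)), Dom_check_service_order service_name service_config → Spec_check_service_order service_name service_config (check_service_order service_name service_config)

-- ===== LEMMAS AND PROOFS =====

-- inserting x into c1 ++ c2 where x must not go before anything in c1 and goes before all of c2
theorem pv_insertBy_split {α : Type} (bef : α → α → Bool) (x : α) (c1 c2 : List α)
    (h1 : ∀ y ∈ c1, bef x y = false) (h2 : ∀ y ∈ c2, bef x y = true) :
    PySem.List.insertBy bef x (c1 ++ c2) = c1 ++ x :: c2 := by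
  induction c1 with
  | nil =>
    cases c2 with
    | nil => simp [PySem.List.insertBy]
    | cons y ys => simp [PySem.List.insertBy, h2 y (List.mem_cons_self ..)]
  | cons a c1 ih =>
    simp [PySem.List.insertBy, h1 a (List.mem_cons_self ..)]
    exact ih (fun y hy => h1 y (List.mem_cons_of_mem _ hy))

-- a stable sort whose key values all lie in a strictly increasing value list vs is the
-- concatenation of the per-value buckets, each in original order
theorem pv_sorted_buckets {α : Type} (key : α → Int) (vs : List Int) (hvs : vs.Pairwise (· < ·))
    (xs : List α) (hmem : ∀ x ∈ xs, key x ∈ vs) :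
    PySem.List.sorted xs key false = vs.flatMap (fun v => xs.filter (fun x => decide (key x = v))) := by
  induction xs using List.reverseRecOn with
  | nil => simp [PySem.List.sorted]
  | append_singleton l x ih =>
    have hlx : key x ∈ vs := hmem x (by simp)
    obtain ⟨a, b, hvse⟩ := List.append_of_mem hlx
    subst hvse
    have hpa := (List.pairwise_append.mp hvs).2.2
    have hab := (List.pairwise_append.mp hvs).2.1
    have ha : ∀ v ∈ a, v < key x := fun v hv => hpa v hv (key x) (List.mem_cons_self ..)
    have hb : ∀ v ∈ b, key x < v := (List.pairwise_cons.mp hab).1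
    have hsort : PySem.List.sorted (l ++ [x]) key false =
        PySem.List.insertBy (fun p q => decide (key p < key q)) x (PySem.List.sorted l key false) := by
      rw [PySem.List.sorted_eq_foldl_insertBy, PySem.List.sorted_eq_foldl_insertBy, List.foldl_append]
      rfl
    rw [hsort, ih (fun y hy => hmem y (List.mem_append_left _ hy))]
    set F := fun v => l.filter (fun y => decide (key y = v)) with hF
    have hflat : (a ++ key x :: b).flatMap F = (a.flatMap F ++ F (key x)) ++ b.flatMap F := by
      simp [List.flatMap_append]
    rw [hflat]
    have h1 : ∀ y ∈ a.flatMap F ++ F (key x), (fun p q => decide (key p < key q)) x y = false := by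
      intro y hy
      rcases List.mem_append.mp hy with hy | hy
      · obtain ⟨v, hv, hyf⟩ := List.mem_flatMap.mp hy
        have : key y = v := by
          have := List.of_mem_filter (p := fun y => decide (key y = v)) hyf
          simpa using this
        simp only [decide_eq_false_iff_not, not_lt, this]
        exact le_of_lt (ha v hv)
      · have : key y = key x := by
          have := List.of_mem_filter (p := fun y => decide (key y = key x)) hy
          simpa using this
        simp [this]
    have h2 : ∀ y ∈ b.flatMap F, (fun p q => decide (key p < key q)) x y = true := by
      intro y hy
      obtain ⟨v, hv, hyf⟩ := List.mem_flatMap.mp hy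
      have : key y = v := by
        have := List.of_mem_filter (p := fun y => decide (key y = v)) hyf
        simpa using this
      simp only [decide_eq_true_eq, this]
      exact hb v hv
    rw [pv_insertBy_split _ x _ _ h1 h2]
    have hG : ∀ v : Int, (l ++ [x]).filter (fun y => decide (key y = v)) =
        F v ++ if key x = v then [x] else [] := by
      intro v
      rw [List.filter_append, hF]
      by_cases h : key x = v <;> simp [h]
    have hGa : ∀ v ∈ a, (l ++ [x]).filter (fun y => decide (key y = v)) = F v := by
      intro v hv
      rw [hG v, if_neg (by exact fun h => absurd (ha v hv) (by simp [h])), List.append_nil]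
    have hGb : ∀ v ∈ b, (l ++ [x]).filter (fun y => decide (key y = v)) = F v := by
      intro v hv
      rw [hG v, if_neg (by exact fun h => absurd (hb v hv) (by simp [h])), List.append_nil]
    rw [List.flatMap_append, List.flatMap_cons, List.flatMap_congr hGa, List.flatMap_congr hGb,
      hG (key x), if_pos rfl]
    simp

-- the strictly increasing list of all values get_key_index can take
def pvVS : List Int := pvKEY_ORDER.map get_key_index ++ [(pvKEY_ORDER.length : Int)]

theorem pv_vs_pairwise : pvVS.Pairwise (· < ·) := by decide

theorem pv_gki_some {k : String} {i : Nat} (h : PySem.List.index? pvKEY_ORDER k = some i) :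
    get_key_index k = (i : Int) := by
  unfold get_key_index; rw [h]

theorem pv_gki_none {k : String} (h : PySem.List.index? pvKEY_ORDER k = none) :
    get_key_index k = (pvKEY_ORDER.length : Int) := by
  unfold get_key_index; rw [h]

theorem pv_gki_mem (k : String) : get_key_index k ∈ pvVS := by
  by_cases hk : k ∈ pvKEY_ORDER
  · exact List.mem_append_left _ (List.mem_map_of_mem hk)
  · have h := pv_gki_none ((PySem.List.index?_eq_none_iff pvKEY_ORDER k).mpr hk)
    simp [pvVS, h]

theorem pv_gki_eq_iff (o : String) (ho : o ∈ pvKEY_ORDER) (k : String) :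
    get_key_index k = get_key_index o ↔ k = o := by
  obtain ⟨j, hj⟩ := Option.isSome_iff_exists.mp
    ((PySem.List.index?_isSome_iff pvKEY_ORDER o).mpr ho)
  obtain ⟨hjlt, hjval, -⟩ := PySem.List.getElem_of_index?_eq_some hj
  have hgo : get_key_index o = (j : Int) := pv_gki_some hj
  constructor
  · intro h
    rw [hgo] at h
    cases hik : PySem.List.index? pvKEY_ORDER k with
    | none =>
      rw [pv_gki_none hik] at h
      have : pvKEY_ORDER.length = j := by exact_mod_cast h
      omega
    | some i =>
      obtain ⟨hilt, hival, -⟩ := PySem.List.getElem_of_index?_eq_some hik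
      rw [pv_gki_some hik] at h
      have hij : i = j := by exact_mod_cast h
      subst hij
      rw [← hival, ← hjval]
  · rintro rfl; rfl

theorem pv_gki_top (k : String) :
    decide (get_key_index k = (pvKEY_ORDER.length : Int)) = !pvKEY_ORDER.contains k := by
  by_cases hk : k ∈ pvKEY_ORDER
  · obtain ⟨i, hi⟩ := Option.isSome_iff_exists.mp
      ((PySem.List.index?_isSome_iff pvKEY_ORDER k).mpr hk)
    obtain ⟨hilt, -, -⟩ := PySem.List.getElem_of_index?_eq_some hi
    have hne : get_key_index k ≠ (pvKEY_ORDER.length : Int) := by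
      rw [pv_gki_some hi]
      intro h
      have : i = pvKEY_ORDER.length := by exact_mod_cast h
      omega
    simp [hne, hk]
  · rw [pv_gki_none ((PySem.List.index?_eq_none_iff pvKEY_ORDER k).mpr hk)]
    simp [hk]

-- the sorted expected order IS B's reconstruction: known keys in table order, then unknown keys
theorem pv_expected_eq (keys : List String) :
    PySem.List.sorted keys (fun k => get_key_index k) false =
      pvKEY_ORDER.flatMap (fun known => keys.filter (fun k => k == known))
        ++ keys.filter (fun k => !(pvKEY_ORDER.contains k)) := by
  rw [pv_sorted_buckets (fun k => get_key_index k) pvVS pv_vs_pairwise keys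
    (fun x _ => pv_gki_mem x)]
  rw [pvVS, List.flatMap_append, List.flatMap_map]
  congr 1
  · apply List.flatMap_congr
    intro o ho
    apply List.filter_congr
    intro k _
    simp [pv_gki_eq_iff o ho k, beq_eq_decide]
  · simp only [List.flatMap_cons, List.flatMap_nil, List.append_nil]
    exact List.filter_congr (fun k _ => pv_gki_top k)

-- ===== VERDICT (by name: the statement is the Claim_ definition above) =====
theorem check_service_order_spec : Claim_equal_check_service_order := by
  intro service_name service_config _
  unfold Spec_check_service_order check_service_order check_service_order_alt
  simp only [pv_expected_eq,
    PySem.List.foldl_append_if (fun pr : String × String => pr.1 != pr.2)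
      (fun pr : String × String =>
        "Service '" ++ service_name ++ "': key '" ++ pr.1 ++ "' should come after '" ++ pr.2 ++ "'"),
    List.nil_append]
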